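-- pv_equiv track=rewrite | github.com/ihni/movie-system | app/src/models/theatres/theatre.py | get_seat_position
-- ===== SOURCE A (Python) =====
-- def get_seat_position(seat_name):
--     row_part: str = ''.join(filter(str.isalpha, seat_name))
--     column_part: str = ''.join(filter(str.isdigit, seat_name))
--
--     column: int = int(column_part) - 1
--     row: int = 0
--
--     for index, char in enumerate(reversed(row_part)):
--         row += (ord(char) - ord('A')) * (26 ** index)
--     return row, column
-- ===== SOURCE B (Python) =====
-- def get_seat_position(seat_name):
--     row_part = ''.join(c for c in seat_name if c.isalpha())
--     column_part = ''.join(c for c in seat_name if c.isdigit())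
--
--     def letters_value(s):
--         # divide and conquer: value(l + r) = value(l) * 26**len(r) + value(r)
--         if not s:
--             return 0
--         if len(s) == 1:
--             return ord(s) - ord('A')
--         mid = len(s) // 2
--         return letters_value(s[:mid]) * 26 ** (len(s) - mid) + letters_value(s[mid:])
--
--     return letters_value(row_part), int(column_part) - 1
-- ===== Notes on version B (the rewrite author's own statement) =====
-- stated objective: alternative
-- what changed: The base-26 letter value is computed by divide-and-conquer on the letter string (value(l+r) = value(l)*26**len(r) + value(r)) instead of A's linear reversed scan with per-character 26**index powers.
import Mathlib
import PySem

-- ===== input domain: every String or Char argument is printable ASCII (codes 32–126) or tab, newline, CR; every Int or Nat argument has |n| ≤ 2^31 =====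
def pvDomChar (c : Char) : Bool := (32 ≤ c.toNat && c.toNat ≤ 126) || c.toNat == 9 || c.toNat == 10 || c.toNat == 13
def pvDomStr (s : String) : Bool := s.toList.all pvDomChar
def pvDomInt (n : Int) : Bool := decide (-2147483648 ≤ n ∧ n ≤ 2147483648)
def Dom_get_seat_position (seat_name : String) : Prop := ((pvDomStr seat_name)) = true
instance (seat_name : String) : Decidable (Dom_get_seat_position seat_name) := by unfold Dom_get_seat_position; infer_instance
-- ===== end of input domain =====

-- ===== PORT A =====
-- B computes the base-26 letter value by divide and conquer instead of A's reversed
-- scan with 26**index powers; return-value equivalence on inputs containing a digit.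
-- ord(char) - ord('A') is ported as c.toNat - 65; 26 ** index (index ≥ 0 from enumerate) as 26 ^ index.toNat.
def get_seat_position (seat_name : String) : Int × Int :=
  let row_part : List Char := seat_name.toList.filter PySem.Chars.isalpha
  let column_part : List Char := seat_name.toList.filter PySem.Chars.isdigit
  let column : Int := (PySem.Int.ofChars? column_part).getD 0 - 1
  let row : Int := (PySem.List.enumerate row_part.reverse).foldl
    (fun row p => row + ((p.2.toNat : Int) - 65) * 26 ^ p.1.toNat) 0
  (row, column)

-- ===== PORT B =====
-- letters_value: s[:mid] / s[mid:] with 0 ≤ mid ≤ len are List.take / List.drop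
-- (PySem.List.slice_to / slice_from), and len(s) // 2 on a Nat is Nat division.
def pvLettersValue : List Char → Int
  | [] => 0
  | [c] => (c.toNat : Int) - 65
  | a :: b :: t =>
      let s := a :: b :: t
      let mid := s.length / 2
      pvLettersValue (s.take mid) * 26 ^ (s.length - mid) + pvLettersValue (s.drop mid)
termination_by s => s.length
decreasing_by
  · simp; omega
  · simp; omega

def get_seat_position_alt (seat_name : String) : Int × Int :=
  let row_part : List Char := seat_name.toList.filter PySem.Chars.isalpha
  let column_part : List Char := seat_name.toList.filter PySem.Chars.isdigit
  (pvLettersValue row_part, (PySem.Int.ofChars? column_part).getD 0 - 1)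

-- ===== PRECONDITION & SPEC =====
-- Pre_ excludes exactly the inputs with no digit character: there A raises ValueError (int of an empty digit part), and B raises the same ValueError.
def Pre_get_seat_position (seat_name : String) : Prop :=
  seat_name.toList.any PySem.Chars.isdigit = true
instance (seat_name : String) : Decidable (Pre_get_seat_position seat_name) := by
  unfold Pre_get_seat_position; infer_instance
def pvWitness_get_seat_position : String := "AB12"
def Spec_get_seat_position (seat_name : String) (out : Int × Int) : Prop := out = get_seat_position_alt seat_name
instance (seat_name : String) (out : Int × Int) : Decidable (Spec_get_seat_position seat_name out) := by unfold Spec_get_seat_position; infer_instance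

-- ===== CLAIM (what is proved, stated in full; the proofs are below) =====
def Claim_equal_get_seat_position : Prop := ∀ (seat_name : String), Dom_get_seat_position seat_name → Pre_get_seat_position seat_name → Spec_get_seat_position seat_name (get_seat_position seat_name)

-- ===== LEMMAS AND PROOFS =====

-- the per-pair contribution of A's loop, and the Horner step both sides are reduced to
def pvStep (p : Int × Char) : Int := ((p.2.toNat : Int) - 65) * 26 ^ p.1.toNat
def pvH (r : Int) (c : Char) : Int := r * 26 + ((c.toNat : Int) - 65)

lemma pv_foldl_shift (l : List (Int × Char)) (a : Int) :
    l.foldl (fun r p => r + pvStep p) a = a + l.foldl (fun r p => r + pvStep p) 0 := by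
  induction l generalizing a with
  | nil => simp
  | cons p t ih => simp only [List.foldl_cons]; rw [ih, ih (0 + pvStep p)]; ring

-- Horner fold started from a is the fold from 0 shifted by a * 26^len
lemma pv_horner_shift (l : List Char) (a : Int) :
    l.foldl pvH a = a * 26 ^ l.length + l.foldl pvH 0 := by
  induction l generalizing a with
  | nil => simp
  | cons c t ih =>
    simp only [List.foldl_cons, List.length_cons]
    rw [ih, ih (pvH 0 c)]
    simp only [pvH]
    ring

-- A's reversed-enumerate powers loop equals the forward Horner fold
lemma pv_main (l : List Char) : ∀ s : Int, 0 ≤ s →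
    (PySem.List.enumerate l s).foldl (fun r p => r + pvStep p) 0
      = 26 ^ s.toNat * (l.reverse.foldl pvH 0) := by
  induction l with
  | nil => intro s _; simp [PySem.List.enumerate]
  | cons c t ih =>
    intro s hs
    have h1 : (s + 1).toNat = s.toNat + 1 := by omega
    simp only [PySem.List.enumerate, List.foldl_cons, List.reverse_cons]
    rw [pv_foldl_shift, ih (s + 1) (by omega), List.foldl_append]
    simp only [List.foldl_cons, List.foldl_nil]
    rw [pv_horner_shift]
    simp only [pvStep, pvH, h1]
    ring

-- B's divide and conquer equals the forward Horner fold
lemma pv_dc (l : List Char) : pvLettersValue l = l.foldl pvH 0 := by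
  induction l using pvLettersValue.induct with
  | case1 => simp [pvLettersValue]
  | case2 c => simp [pvLettersValue, pvH]
  | case3 a b t s mid ih1 ih2 =>
    rw [pvLettersValue, ih1, ih2]
    conv_rhs => rw [show (a :: b :: t) = s from rfl, ← List.take_append_drop mid s,
      List.foldl_append, pv_horner_shift]
    simp [List.length_drop]
    left
    have h1 : s.length = t.length + 1 + 1 := rfl
    have h2 : mid = s.length / 2 := rfl
    omega

-- ===== VERDICT (by name: the statement is the Claim_ definition above) =====
theorem get_seat_position_spec : Claim_equal_get_seat_position := by
  intro seat_name _ _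
  show _ = _
  have hA := pv_main (seat_name.toList.filter PySem.Chars.isalpha).reverse 0 le_rfl
  simp only [List.reverse_reverse] at hA
  norm_num at hA
  simp only [pvStep] at hA
  simp [get_seat_position, get_seat_position_alt, pv_dc, hA]
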